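-- pv_equiv track=rewrite | github.com/MelbourneFuzzingHub/aflteam | utils/helpers.py | group_tasks
-- ===== SOURCE A (Python) =====
-- def group_tasks(arr, k):
--     result = [[] for _ in range(k)]
--     sums = [0] * k
--     for x in sorted(arr, key=len, reverse=True):
--         i = sums.index(min(sums))
--         sums[i] += len(x)
--         result[i].append(x)
--     return result
-- ===== SOURCE B (Python) =====
-- def group_tasks(arr, k):
--     result = [[] for _ in range(k)]
--     # (bin sum, bin index) pairs kept sorted ascending; front = min sum, smallest index first
--     pairs = [(0, i) for i in range(k)]
--     for x in sorted(arr, key=len, reverse=True):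
--         s, i = pairs.pop(0)
--         result[i].append(x)
--         item = (s + len(x), i)
--         lo, hi = 0, len(pairs)
--         while lo < hi:
--             mid = (lo + hi) // 2
--             if pairs[mid] < item:
--                 lo = mid + 1
--             else:
--                 hi = mid
--         pairs.insert(lo, item)
--     return result
-- ===== Notes on version B (the rewrite author's own statement) =====
-- stated objective: faster
-- what changed: Instead of rescanning all k bin sums with min()+index() at every step, B maintains one list of (sum, bin) pairs kept sorted ascending: each step pops the front pair (the minimum sum, tie-broken by smallest bin index, exactly A's choice) and re-inserts the updated pair at the position found by a hand-written binary search.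
import Mathlib
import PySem

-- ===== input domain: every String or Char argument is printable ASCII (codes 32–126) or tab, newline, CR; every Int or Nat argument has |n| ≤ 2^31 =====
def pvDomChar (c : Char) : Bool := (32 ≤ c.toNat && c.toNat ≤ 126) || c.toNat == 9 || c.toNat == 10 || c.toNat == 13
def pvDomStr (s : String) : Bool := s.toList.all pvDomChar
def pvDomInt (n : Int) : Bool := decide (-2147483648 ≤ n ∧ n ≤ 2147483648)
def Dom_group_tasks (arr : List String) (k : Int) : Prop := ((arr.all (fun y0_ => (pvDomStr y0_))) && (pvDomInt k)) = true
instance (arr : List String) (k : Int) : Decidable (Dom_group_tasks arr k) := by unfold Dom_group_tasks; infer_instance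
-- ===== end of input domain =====

-- B replaces A's per-step min()+index() rescan of all k bin sums by a list of (sum, bin) pairs
-- kept sorted ascending: pop the front pair, re-insert the updated pair at its sorted position
-- (same greedy LPT result, including A's smallest-index tie-breaking).

-- ===== PORT A =====
-- result[i].append(x)  (shared by both ports: both Pythons do exactly this)
def pvAppendAt (res : List (List String)) (i : Nat) (x : String) : List (List String) :=
  res.set i (res.getD i [] ++ [x])

-- the body of A's for-loop: i = sums.index(min(sums)); sums[i] += len(x); result[i].append(x)
def pvStepA (st : List Int × List (List String)) (x : String) :
    List Int × List (List String) :=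
  match PySem.List.min? st.1 (fun v => v) with
  | none => st        -- Python: min([]) raises ValueError (k ≤ 0, arr ≠ []); outside Pre_
  | some m =>
    match PySem.List.index? st.1 m with
    | none => st      -- unreachable: min(sums) ∈ sums
    | some i => (st.1.set i (st.1.getD i 0 + PySem.Str.len x), pvAppendAt st.2 i x)

def group_tasks (arr : List String) (k : Int) : List (List String) :=
  let result := (PySem.List.pyRange 0 k 1).map (fun _ => ([] : List String))
  let sums := PySem.List.pyRepeat [(0 : Int)] k
  ((PySem.List.sorted arr (fun s => PySem.Str.len s) true).foldl pvStepA (sums, result)).2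

-- ===== PORT B =====
-- Python tuple '<' on (int, int)
def pvTupLtB (a b : Int × Int) : Bool :=
  a.1 < b.1 || (a.1 == b.1 && a.2 < b.2)

-- B's while-loop binary search (Python lo, hi are nonnegative ints here — Nat is exact;
-- (lo + hi) // 2 on nonnegative ints is Nat division; the fuel argument is only a
-- totality guard: hi - lo shrinks every iteration, so fuel = hi - lo never runs out)
def pvBisect (pairs : List (Int × Int)) (item : Int × Int) : Nat → Nat → Nat → Nat
  | 0, lo, _hi => lo
  | fuel + 1, lo, hi =>
    if lo < hi then
      let mid := (lo + hi) / 2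
      if pvTupLtB (pairs.getD mid (0, 0)) item then pvBisect pairs item fuel (mid + 1) hi
      else pvBisect pairs item fuel lo mid
    else lo

-- the body of B's for-loop: pop the front pair, append, binary-search the insertion
-- position, pairs.insert(lo, item)
def pvStepB (st : List (Int × Int) × List (List String)) (x : String) :
    List (Int × Int) × List (List String) :=
  match st.1 with
  | [] => st          -- Python: pairs.pop(0) raises IndexError (k ≤ 0, arr ≠ []); outside Pre_
  | (s, i) :: rest =>
      let item := (s + PySem.Str.len x, i)
      let lo := pvBisect rest item rest.length 0 rest.length
      (PySem.List.insert rest (lo : Int) item, pvAppendAt st.2 i.toNat x)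

def group_tasks_alt (arr : List String) (k : Int) : List (List String) :=
  let result := (PySem.List.pyRange 0 k 1).map (fun _ => ([] : List String))
  let pairs := (PySem.List.pyRange 0 k 1).map (fun i => ((0 : Int), i))
  ((PySem.List.sorted arr (fun s => PySem.Str.len s) true).foldl pvStepB (pairs, result)).2

-- ===== PRECONDITION & SPEC =====
-- Pre_ excludes only the inputs where A raises: k ≤ 0 with arr nonempty makes A's min([]) raise ValueError.
def Pre_group_tasks (arr : List String) (k : Int) : Prop := 0 < k ∨ arr = []
instance (arr : List String) (k : Int) : Decidable (Pre_group_tasks arr k) := by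
  unfold Pre_group_tasks; infer_instance
def pvWitness_group_tasks : List String × Int := (["ab", "c"], 2)

def Spec_group_tasks (arr : List String) (k : Int) (out : List (List String)) : Prop := out = group_tasks_alt arr k
instance (arr : List String) (k : Int) (out : List (List String)) : Decidable (Spec_group_tasks arr k out) := by unfold Spec_group_tasks; infer_instance

-- ===== CLAIM (what is proved, stated in full; the proofs are below) =====
def Claim_equal_group_tasks : Prop := ∀ (arr : List String) (k : Int), Dom_group_tasks arr k → Pre_group_tasks arr k → Spec_group_tasks arr k (group_tasks arr k)

-- ===== LEMMAS AND PROOFS =====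

-- proof-side structural sorted-insert; B's binary-search insert is proved equal to it on sorted lists
def pvInsertPair (item : Int × Int) : List (Int × Int) → List (Int × Int)
  | [] => [item]
  | p :: rest => if pvTupLtB p item then p :: pvInsertPair item rest else item :: p :: rest

-- lexicographic ≤ on pairs, the order B's sorted list obeys
def pvLe (a b : Int × Int) : Prop := a.1 < b.1 ∨ (a.1 = b.1 ∧ a.2 ≤ b.2)

-- (value, index) pairs of a sums list
def pvEnum (sums : List Int) : List (Int × Int) :=
  (PySem.List.enumerate sums 0).map (fun p => (p.2, p.1))

theorem pvEnum_length (sums : List Int) : (pvEnum sums).length = sums.length := by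
  simp [pvEnum, PySem.List.length_enumerate]

theorem pvEnum_getElem (sums : List Int) (p : Nat) (hp : p < (pvEnum sums).length) :
    (pvEnum sums)[p] = (sums[p]'(by simpa [pvEnum_length] using hp), (p : Int)) := by
  simp [pvEnum, PySem.List.getElem_enumerate]

theorem mem_pvEnum {sums : List Int} {y : Int × Int} (hy : y ∈ pvEnum sums) :
    ∃ (j : Nat) (hj : j < sums.length), y = (sums[j], (j : Int)) := by
  obtain ⟨p, hp, rfl⟩ := List.getElem_of_mem hy
  exact ⟨p, by simpa [pvEnum_length] using hp, by rw [pvEnum_getElem]⟩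

theorem pvTupLtB_false {a b : Int × Int} (h : pvTupLtB a b = false) : pvLe b a := by
  obtain ⟨a1, a2⟩ := a
  obtain ⟨b1, b2⟩ := b
  simp [pvTupLtB] at h
  unfold pvLe
  simp only []
  omega

theorem pvTupLtB_true {a b : Int × Int} (h : pvTupLtB a b = true) : pvLe a b := by
  obtain ⟨a1, a2⟩ := a
  obtain ⟨b1, b2⟩ := b
  simp [pvTupLtB] at h
  unfold pvLe
  simp only []
  omega

theorem pvLe_trans {a b c : Int × Int} (h1 : pvLe a b) (h2 : pvLe b c) : pvLe a c := by
  unfold pvLe at *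
  rcases h1 with h1 | ⟨h1, h1'⟩ <;> rcases h2 with h2 | ⟨h2, h2'⟩
  · exact Or.inl (lt_trans h1 h2)
  · exact Or.inl (h2 ▸ h1)
  · exact Or.inl (h1 ▸ h2)
  · exact Or.inr ⟨h1.trans h2, le_trans h1' h2'⟩

theorem insertPair_perm (it : Int × Int) (l : List (Int × Int)) :
    (pvInsertPair it l).Perm (it :: l) := by
  induction l with
  | nil => simp [pvInsertPair]
  | cons p rest ih =>
    by_cases h : pvTupLtB p it = true
    · simp only [pvInsertPair, h, if_true]
      exact ((ih.cons p).trans (List.Perm.swap it p rest))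
    · simp only [pvInsertPair, Bool.not_eq_true] at *
      simp [h]

theorem insertPair_pairwise {it : Int × Int} {l : List (Int × Int)}
    (hl : l.Pairwise pvLe) : (pvInsertPair it l).Pairwise pvLe := by
  induction l with
  | nil => simp [pvInsertPair]
  | cons p rest ih =>
    rw [List.pairwise_cons] at hl
    obtain ⟨hp, hrest⟩ := hl
    by_cases h : pvTupLtB p it = true
    · simp only [pvInsertPair, h, if_true, List.pairwise_cons]
      refine ⟨?_, ih hrest⟩
      intro y hy
      rcases List.mem_cons.mp ((insertPair_perm it rest).mem_iff.mp hy) with rfl | hy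
      · exact pvTupLtB_true h
      · exact hp y hy
    · simp only [Bool.not_eq_true] at h
      simp only [pvInsertPair, h, Bool.false_eq_true, if_false, List.pairwise_cons]
      have hit : pvLe it p := pvTupLtB_false h
      refine ⟨fun y hy => ?_, ⟨hp, hrest⟩⟩
      rcases List.mem_cons.mp hy with rfl | hy
      · exact hit
      · exact pvLe_trans hit (hp y hy)

-- erase of the (unique-at-n) element equals eraseIdx n
theorem erase_eq_eraseIdx_of_unique {α : Type} [BEq α] [LawfulBEq α] :
    ∀ (l : List α) (n : Nat) (hn : n < l.length),
      (∀ p (hp : p < n), l[p]'(lt_trans hp hn) ≠ l[n]) → l.erase l[n] = l.eraseIdx n := by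
  intro l
  induction l with
  | nil => intro n hn; simp at hn
  | cons a t ih =>
    intro n hn hne
    cases n with
    | zero => simp
    | succ m =>
      have ha : a ≠ (a :: t)[m + 1] := hne 0 (Nat.succ_pos m)
      simp only [List.getElem_cons_succ] at ha ⊢
      rw [List.erase_cons_tail (by simpa using ha), List.eraseIdx_cons_succ]
      have := ih m (by simpa using hn) (fun p hp => by
        have := hne (p + 1) (by omega)
        simpa using this)
      rw [this]

theorem set_perm_cons_eraseIdx {α : Type} :
    ∀ (l : List α) (n : Nat) (b : α), n < l.length →
      (l.set n b).Perm (b :: l.eraseIdx n) := by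
  intro l
  induction l with
  | nil => intro n b hn; simp at hn
  | cons a t ih =>
    intro n b hn
    cases n with
    | zero => simp
    | succ m =>
      simp only [List.set_cons_succ, List.eraseIdx_cons_succ]
      exact ((ih m b (by simpa using hn)).cons a).trans (List.Perm.swap b a _)

theorem pvEnum_set (sums : List Int) (j : Nat) (v : Int) (_hj : j < sums.length) :
    pvEnum (sums.set j v) = (pvEnum sums).set j (v, (j : Int)) := by
  apply List.ext_getElem
  · simp [pvEnum_length]
  · intro p hp hp2
    rw [pvEnum_getElem, List.getElem_set, List.getElem_set]
    by_cases h : j = p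
    · subst h
      simp
    · rw [if_neg h, if_neg h, pvEnum_getElem]

-- head of the sorted pair list is (min sums, first index achieving it)
theorem head_min {sums : List Int} {m i : Int} {rest : List (Int × Int)}
    (hperm : ((m, i) :: rest).Perm (pvEnum sums))
    (hsort : ((m, i) :: rest).Pairwise pvLe) :
    ∃ (j : Nat) (hj : j < sums.length), i = (j : Int) ∧ sums[j] = m ∧
      (∀ y ∈ sums, m ≤ y) ∧ (∀ p (hp : p < j), sums[p]'(lt_trans hp hj) ≠ m) := by
  have hmem : (m, i) ∈ pvEnum sums := hperm.mem_iff.mp (List.mem_cons_self)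
  obtain ⟨j, hj, heq⟩ := mem_pvEnum hmem
  have hm : sums[j] = m := by cases heq; rfl
  have hi : i = (j : Int) := by cases heq; rfl
  have hle : ∀ y ∈ rest, pvLe (m, i) y := (List.pairwise_cons.mp hsort).1
  -- every enum pair is the head or in rest, so head is pvLe-below all of them
  have hall : ∀ y ∈ pvEnum sums, pvLe (m, i) y := by
    intro y hy
    rcases List.mem_cons.mp (hperm.mem_iff.mpr hy) with rfl | hy'
    · exact Or.inr ⟨rfl, le_refl _⟩
    · exact hle y hy'
  refine ⟨j, hj, hi, hm, ?_, ?_⟩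
  · intro y hy
    obtain ⟨p, hp, rfl⟩ := List.getElem_of_mem hy
    have := hall (sums[p], (p : Int)) (by
      rw [← pvEnum_getElem sums p (by simpa [pvEnum_length] using hp)]
      exact List.getElem_mem _)
    rcases this with h | ⟨h, _⟩
    · exact le_of_lt h
    · exact le_of_eq h
  · intro p hp hEq
    have := hall (sums[p]'(lt_trans hp hj), (p : Int)) (by
      rw [← pvEnum_getElem sums p (by simpa [pvEnum_length] using lt_trans hp hj)]
      exact List.getElem_mem _)
    rcases this with h | ⟨_, h⟩
    · omega
    · rw [hi] at h; omega

-- m is the minimum value of sums, attained at j and nowhere earlier ⇒ min? and index? compute (m, j)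
theorem min?_eq {sums : List Int} {m : Int} (hmem : m ∈ sums)
    (hmin : ∀ y ∈ sums, m ≤ y) : PySem.List.min? sums (fun v => v) = some m := by
  cases h : PySem.List.min? sums (fun v => v) with
  | none =>
    rw [PySem.List.min?_eq_none_iff] at h
    subst h; simp at hmem
  | some m' =>
    have h1 : m' ≤ m := PySem.List.min?_isMin h m hmem
    have h2 : m ≤ m' := hmin m' (PySem.List.min?_mem h)
    rw [le_antisymm h1 h2]

theorem index?_eq {sums : List Int} {m : Int} {j : Nat} (hj : j < sums.length)
    (hm : sums[j] = m) (hfirst : ∀ p (hp : p < j), sums[p]'(lt_trans hp hj) ≠ m) :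
    PySem.List.index? sums m = some j := by
  rw [PySem.List.index?_eq_some_iff]
  refine ⟨sums.take j, sums.drop (j + 1), ?_, by simpa using le_of_lt hj, ?_⟩
  · conv_lhs => rw [← List.take_append_drop j sums]
    rw [← List.getElem_cons_drop hj, hm]
  · intro hmem
    obtain ⟨p, hp, hpe⟩ := List.getElem_of_mem hmem
    rw [List.getElem_take] at hpe
    exact hfirst p (by simp at hp; exact hp.1) hpe

theorem ltB_of_le_ltB {a b c : Int × Int} (h1 : pvLe a b) (h2 : pvTupLtB b c = true) :
    pvTupLtB a c = true := by
  obtain ⟨a1, a2⟩ := a; obtain ⟨b1, b2⟩ := b; obtain ⟨c1, c2⟩ := c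
  simp [pvTupLtB] at *
  unfold pvLe at h1
  simp only [] at h1
  omega

theorem ltB_false_of_le {a b c : Int × Int} (h1 : pvLe a b) (h2 : pvTupLtB a c = false) :
    pvTupLtB b c = false := by
  obtain ⟨a1, a2⟩ := a; obtain ⟨b1, b2⟩ := b; obtain ⟨c1, c2⟩ := c
  simp [pvTupLtB] at *
  unfold pvLe at h1
  simp only [] at h1
  omega

-- splicing at a position whose left side is all < item and right side all ≥ item IS pvInsertPair
theorem take_drop_eq_insertPair (item : Int × Int) :
    ∀ (l : List (Int × Int)) (r : Nat), r ≤ l.length →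
      (∀ p, p < r → pvTupLtB (l.getD p (0, 0)) item = true) →
      (∀ p, p < l.length → r ≤ p → pvTupLtB (l.getD p (0, 0)) item = false) →
      l.take r ++ item :: l.drop r = pvInsertPair item l := by
  intro l
  induction l with
  | nil =>
    intro r hr _ _
    have : r = 0 := by simpa using hr
    subst this
    simp [pvInsertPair]
  | cons a t ih =>
    intro r hr hlo hhi
    cases r with
    | zero =>
      have := hhi 0 (by simp) (by omega)
      simp only [List.getD_cons_zero] at this
      simp [pvInsertPair, this]
    | succ q =>
      have ha := hlo 0 (by omega)
      simp only [List.getD_cons_zero] at ha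
      simp only [List.take_succ_cons, List.drop_succ_cons, List.cons_append, pvInsertPair, ha,
        if_true]
      congr 1
      exact ih q (by simpa using hr)
        (fun p hp => by simpa using hlo (p + 1) (by omega))
        (fun p hp hq => by simpa using hhi (p + 1) (by simpa using hp) (by omega))

-- the binary search returns a splice position with those boundary properties
theorem bisect_spec (item : Int × Int) :
    ∀ (fuel : Nat) (l : List (Int × Int)) (lo hi : Nat), hi - lo ≤ fuel → lo ≤ hi →
      hi ≤ l.length → l.Pairwise pvLe →
      (∀ p, p < lo → pvTupLtB (l.getD p (0, 0)) item = true) →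
      (∀ p, p < l.length → hi ≤ p → pvTupLtB (l.getD p (0, 0)) item = false) →
      pvBisect l item fuel lo hi ≤ l.length ∧
      (∀ p, p < pvBisect l item fuel lo hi → pvTupLtB (l.getD p (0, 0)) item = true) ∧
      (∀ p, p < l.length → pvBisect l item fuel lo hi ≤ p →
        pvTupLtB (l.getD p (0, 0)) item = false) := by
  intro fuel
  induction fuel with
  | zero =>
    intro l lo hi hn hlh hhl _ hlo hhi
    have : lo = hi := by omega
    subst this
    exact ⟨hhl, hlo, hhi⟩
  | succ n ih =>
    intro l lo hi hn hlh hhl hsort hlo hhi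
    simp only [pvBisect]
    by_cases h : lo < hi
    · have hmid : (lo + hi) / 2 < l.length := by omega
      have hpair : ∀ p q, p < q → q < l.length →
          pvLe (l.getD p (0, 0)) (l.getD q (0, 0)) := by
        intro p q hpq hq
        rw [List.getD_eq_getElem l (0, 0) (by omega), List.getD_eq_getElem l (0, 0) hq]
        exact List.pairwise_iff_getElem.mp hsort p q (by omega) hq hpq
      rw [if_pos h]
      by_cases hc : pvTupLtB (l.getD ((lo + hi) / 2) (0, 0)) item = true
      · rw [if_pos hc]
        exact ih l ((lo + hi) / 2 + 1) hi (by omega) (by omega) hhl hsort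
          (fun p hp => by
            rcases Nat.lt_or_ge p ((lo + hi) / 2) with hp' | hp'
            · exact ltB_of_le_ltB (hpair p ((lo + hi) / 2) hp' hmid) hc
            · have : p = (lo + hi) / 2 := by omega
              subst this; exact hc)
          hhi
      · rw [if_neg hc]
        rw [Bool.not_eq_true] at hc
        exact ih l lo ((lo + hi) / 2) (by omega) (by omega) (by omega) hsort hlo
          (fun p hp hmp => by
            rcases Nat.lt_or_ge ((lo + hi) / 2) p with hp' | hp'
            · exact ltB_false_of_le (hpair ((lo + hi) / 2) p hp' hp) hc
            · have : p = (lo + hi) / 2 := by omega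
              subst this; exact hc)
    · rw [if_neg h]
      have : lo = hi := by omega
      subst this
      exact ⟨hhl, hlo, hhi⟩

-- on a sorted list, B's binary-search insert computes pvInsertPair
theorem bisect_insert_eq_insertPair (item : Int × Int) (l : List (Int × Int))
    (hsort : l.Pairwise pvLe) :
    PySem.List.insert l ((pvBisect l item l.length 0 l.length : Nat) : Int) item
      = pvInsertPair item l := by
  obtain ⟨h1, h2, h3⟩ := bisect_spec item l.length l 0 l.length (by omega) (by omega) le_rfl
    hsort (fun p hp => by omega) (fun p hp hq => by omega)
  rw [PySem.List.insert_natCast l (pvBisect l item l.length 0 l.length) item h1]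
  exact take_drop_eq_insertPair item l (pvBisect l item l.length 0 l.length) h1 h2 h3

-- the main simulation: from related states, the two folds produce the same result table
theorem fold_sim :
    ∀ (xs : List String) (sums : List Int) (pairs : List (Int × Int)) (res : List (List String)),
      sums ≠ [] → pairs.Perm (pvEnum sums) → pairs.Pairwise pvLe →
      (xs.foldl pvStepA (sums, res)).2 = (xs.foldl pvStepB (pairs, res)).2 := by
  intro xs
  induction xs with
  | nil => intro sums pairs res _ _ _; rfl
  | cons x t ih =>
    intro sums pairs res hne hperm hsort
    have hlen : pairs.length = sums.length := by
      rw [hperm.length_eq, pvEnum_length]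
    match hpairs : pairs with
    | [] =>
      exfalso
      have : sums.length = 0 := by simpa [hpairs] using hlen.symm
      exact hne (List.length_eq_zero_iff.mp this)
    | (m, i) :: rest =>
      obtain ⟨j, hj, hi, hm, hmin, hfirst⟩ := head_min hperm hsort
      have hL : (t.foldl pvStepA (pvStepA (sums, res) x)).2
              = (t.foldl pvStepB (pvStepB ((m, i) :: rest, res) x)).2 := by
        -- compute both steps
        have hstepA : pvStepA (sums, res) x
            = (sums.set j (m + PySem.Str.len x), pvAppendAt res j x) := by
          simp only [pvStepA, min?_eq (hm ▸ List.getElem_mem hj) hmin,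
            index?_eq hj hm hfirst]
          simp [List.getD_eq_getElem?_getD, List.getElem?_eq_getElem hj, hm]
        have hstepB : pvStepB ((m, i) :: rest, res) x
            = (pvInsertPair (m + PySem.Str.len x, i) rest, pvAppendAt res j x) := by
          simp only [pvStepB]
          rw [bisect_insert_eq_insertPair _ _ (List.pairwise_cons.mp hsort).2]
          simp [hi]
        rw [hstepA, hstepB]
        apply ih
        · intro h
          have hl0 := congrArg List.length h
          simp at hl0
          exact hne hl0
        · -- permutation invariant
          have h1 : rest.Perm ((pvEnum sums).erase (m, i)) :=
            (List.cons_perm_iff_perm_erase.mp hperm).2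
          have h2 : (pvEnum sums).erase (m, i) = (pvEnum sums).eraseIdx j := by
            have hj' : j < (pvEnum sums).length := by simpa [pvEnum_length] using hj
            have hat : (pvEnum sums)[j] = (m, i) := by
              rw [pvEnum_getElem, hm, hi]
            rw [← hat]
            apply erase_eq_eraseIdx_of_unique _ _ hj'
            intro p hp
            rw [pvEnum_getElem, pvEnum_getElem]
            intro hc
            have := congrArg Prod.snd hc
            simp at this
            omega
          have h3 : ((m + PySem.Str.len x, i) :: rest).Perm
              ((m + PySem.Str.len x, i) :: (pvEnum sums).eraseIdx j) :=
            List.Perm.cons _ (h2 ▸ h1)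
          have h4 : (pvEnum (sums.set j (m + PySem.Str.len x))).Perm
              ((m + PySem.Str.len x, i) :: (pvEnum sums).eraseIdx j) := by
            rw [pvEnum_set _ _ _ hj, hi]
            exact set_perm_cons_eraseIdx _ j _ (by simpa [pvEnum_length] using hj)
          exact (insertPair_perm _ _).trans (h3.trans h4.symm)
        · exact insertPair_pairwise (List.pairwise_cons.mp hsort).2
      simpa using hL
  
-- initial states: pairs₀ is exactly pvEnum of sums₀
theorem init_pairs (k : Int) :
    (PySem.List.pyRange 0 k 1).map (fun i => ((0 : Int), i))
      = pvEnum (PySem.List.pyRepeat [(0 : Int)] k) := by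
  rw [PySem.List.pyRepeat_singleton]
  apply List.ext_getElem
  · simp [pvEnum_length, PySem.List.length_pyRange_one]
  · intro p hp hp2
    rw [List.getElem_map, PySem.List.getElem_pyRange_one, pvEnum_getElem]
    simp

theorem init_sorted (k : Int) :
    ((PySem.List.pyRange 0 k 1).map (fun i => ((0 : Int), i))).Pairwise pvLe := by
  apply List.Pairwise.map
  · intro a b (h : a < b)
    exact Or.inr ⟨rfl, le_of_lt h⟩
  · exact PySem.List.pairwise_lt_pyRange_one 0 k

-- ===== VERDICT (by name: the statement is the Claim_ definition above) =====
theorem group_tasks_spec : Claim_equal_group_tasks := by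
  intro arr k _ hpre
  unfold Spec_group_tasks group_tasks group_tasks_alt
  simp only []
  rcases hpre with hk | harr
  · apply fold_sim
    · intro h
      have := congrArg List.length h
      rw [PySem.List.pyRepeat_singleton] at this
      simp at this
      omega
    · rw [init_pairs]
    · exact init_sorted k
  · subst harr
    rw [(PySem.List.sorted_eq_nil_iff _ _ _).mpr rfl]
    rfl
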